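-- pv_equiv track=rewrite | github.com/And1F/CodeWars | 0174_shorter_path.py | directions
-- ===== SOURCE A (Python) =====
-- def directions(goal):
--     ans = []
--     dir = [goal.count("N") - goal.count("S"), goal.count("E") - goal.count("W")]
--
--     if dir[0] > 0: ans += ["N" for _ in range(dir[0])]
--     elif dir[0] < 0: ans += ["S" for _ in range(abs(dir[0]))]
--
--     if dir[1] > 0: ans += ["E" for _ in range(dir[1])]
--     elif dir[1] < 0: ans += ["W" for _ in range(abs(dir[1]))]
--
--     return ans
-- ===== SOURCE B (Python) =====
-- def directions(goal):
--     # cancellation stack: each move cancels a pending opposite move or is pushed;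
--     # the surviving moves are emitted, N/S ones first, then E/W ones
--     acc = []
--     for ch in goal:
--         if ch == "N":
--             _cancel_or_push(acc, "S", "N")
--         elif ch == "S":
--             _cancel_or_push(acc, "N", "S")
--         elif ch == "E":
--             _cancel_or_push(acc, "W", "E")
--         elif ch == "W":
--             _cancel_or_push(acc, "E", "W")
--     return [c for c in acc if c in ("N", "S")] + [c for c in acc if c in ("E", "W")]
--
-- def _cancel_or_push(acc, opp, ch):
--     if opp in acc:
--         acc.remove(opp)
--     else:
--         acc.append(ch)
-- ===== Notes on version B (the rewrite author's own statement) =====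
-- stated objective: alternative
-- what changed: B keeps a cancellation stack: each move removes a pending opposite move from the stack or is pushed onto it, and the survivors are emitted N/S-first; A instead computes the two net totals with four .count scans and replicates the dominant tokens.
import Mathlib
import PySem

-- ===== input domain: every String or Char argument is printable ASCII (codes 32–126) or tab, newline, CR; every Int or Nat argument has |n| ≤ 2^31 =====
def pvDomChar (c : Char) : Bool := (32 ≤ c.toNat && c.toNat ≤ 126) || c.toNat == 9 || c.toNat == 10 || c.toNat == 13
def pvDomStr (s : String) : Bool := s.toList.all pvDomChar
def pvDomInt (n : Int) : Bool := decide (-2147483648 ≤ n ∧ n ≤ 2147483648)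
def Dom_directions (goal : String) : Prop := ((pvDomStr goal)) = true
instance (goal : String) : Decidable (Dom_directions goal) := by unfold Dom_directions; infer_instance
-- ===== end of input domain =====

-- B replaces A's four-.count net-total computation by a cancellation stack (each move cancels a
-- pending opposite or is pushed; survivors are emitted N/S-first) — objective: alternative algorithm.

-- ===== PORT A =====
def directions (goal : String) : List String :=
  let ans : List String := []
  let dir : List Int :=
    [((PySem.Str.count goal "N" : Int) - (PySem.Str.count goal "S" : Int)),
     ((PySem.Str.count goal "E" : Int) - (PySem.Str.count goal "W" : Int))]
  let d0 := (PySem.List.pyGet? dir 0).getD 0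
  let d1 := (PySem.List.pyGet? dir 1).getD 0
  let ans :=
    if d0 > 0 then ans ++ (PySem.List.pyRange 0 d0 1).map (fun _ => "N")
    else if d0 < 0 then ans ++ (PySem.List.pyRange 0 |d0| 1).map (fun _ => "S")
    else ans
  let ans :=
    if d1 > 0 then ans ++ (PySem.List.pyRange 0 d1 1).map (fun _ => "E")
    else if d1 < 0 then ans ++ (PySem.List.pyRange 0 |d1| 1).map (fun _ => "W")
    else ans
  ans

-- ===== PORT B =====
-- _cancel_or_push(acc, opp, ch): acc.remove(opp) is guarded by 'opp in acc', so remove? is some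
def cancelOrPush (acc : List String) (opp ch : String) : List String :=
  if opp ∈ acc then (PySem.List.remove? acc opp).getD acc else acc ++ [ch]

def directions_alt (goal : String) : List String :=
  let acc := goal.toList.foldl (fun acc c =>
      if c = 'N' then cancelOrPush acc "S" "N"
      else if c = 'S' then cancelOrPush acc "N" "S"
      else if c = 'E' then cancelOrPush acc "W" "E"
      else if c = 'W' then cancelOrPush acc "E" "W"
      else acc) []
  acc.filter (fun c => c == "N" || c == "S") ++ acc.filter (fun c => c == "E" || c == "W")

-- ===== PRECONDITION & SPEC =====
def Spec_directions (goal : String) (out : List String) : Prop := out = directions_alt goal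
instance (goal : String) (out : List String) : Decidable (Spec_directions goal out) := by unfold Spec_directions; infer_instance

-- ===== CLAIM (what is proved, stated in full; the proofs are below) =====
def Claim_equal_directions : Prop := ∀ (goal : String), Dom_directions goal → Spec_directions goal (directions goal)

-- ===== LEMMAS AND PROOFS =====

-- the canonical block: |n| copies of p (n ≥ 0) or of q (n < 0)
def pvBlk (n : Int) (p q : String) : List String :=
  if 0 ≤ n then List.replicate n.toNat p else List.replicate (-n).toNat q

theorem pvBlk_neg (n : Int) (p q : String) : pvBlk n p q = pvBlk (-n) q p := by
  unfold pvBlk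
  rcases lt_trichotomy n 0 with h | h | h
  · rw [if_neg (by omega), if_pos (by omega)]
  · subst h; simp
  · rw [if_pos (by omega), if_neg (by omega)]; simp

-- PySem.Chars.count of a single-character pattern is List.count (no PySem lemma covers this)
theorem pv_count_go_single (c : Char) : ∀ (s : List Char) (a : Nat),
    PySem.Chars.count.go [c] s.length s a = a + s.count c := by
  intro s
  induction s with
  | nil => intro a; simp [PySem.Chars.count.go]
  | cons h t ih =>
    intro a
    simp only [List.length_cons, PySem.Chars.count.go, List.count_cons]
    by_cases hc : h = c
    · simp [hc, ih]; omega
    · simp [hc, Ne.symm hc, ih]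

theorem pv_count_single (s : List Char) (c : Char) :
    PySem.Chars.count s [c] = s.count c := by
  simpa using pv_count_go_single c s 0

theorem pv_mem_pvBlk (n : Int) (p q x : String) (hx : x ≠ p) :
    x ∈ pvBlk n p q ↔ (x = q ∧ n < 0) := by
  unfold pvBlk
  split_ifs with h
  · constructor
    · intro hm; exact absurd (List.eq_of_mem_replicate hm) hx
    · rintro ⟨rfl, hn⟩; omega
  · simp only [List.mem_replicate]
    constructor
    · rintro ⟨_, rfl⟩; exact ⟨rfl, by omega⟩
    · rintro ⟨rfl, hn⟩; exact ⟨by omega, rfl⟩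

-- one cancel-or-push step on the tracked filter: block count goes up by one
theorem pv_step_main (acc : List String) (a : Int) (p q : String) (hpq : p ≠ q)
    (f : String → Bool) (hfp : f p = true) (hfq : f q = true)
    (h : acc.filter f = pvBlk a p q) :
    (cancelOrPush acc q p).filter f = pvBlk (a + 1) p q := by
  have hqmem : q ∈ acc ↔ a < 0 := by
    rw [show (q ∈ acc ↔ q ∈ acc.filter f) from (by simp [List.mem_filter, hfq]), h,
      pv_mem_pvBlk a p q q (Ne.symm hpq)]
    simp
  unfold cancelOrPush
  by_cases hm : q ∈ acc
  · have ha : a < 0 := hqmem.mp hm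
    rw [if_pos hm, PySem.List.remove?_eq_some_erase acc q hm, Option.getD_some,
      List.erase_filter.symm, h]
    unfold pvBlk
    rw [if_neg (by omega)]
    have hk : (-a).toNat = (-(a+1)).toNat + 1 := by omega
    rw [hk, List.replicate_succ, List.erase_cons_head]
    split_ifs with h2
    · have e1 : (-(a+1)).toNat = 0 := by omega
      have e2 : (a+1).toNat = 0 := by omega
      rw [e1, e2]
      simp
    · rfl
  · have ha : 0 ≤ a := by by_contra hc; exact hm (hqmem.mpr (by omega))
    rw [if_neg hm, List.filter_append, h]
    unfold pvBlk
    rw [if_pos ha, if_pos (by omega)]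
    simp [hfp, ← List.replicate_succ']
    omega

-- one cancel-or-push step leaves the other axis' filter unchanged
theorem pv_step_other (acc : List String) (p q : String)
    (g : String → Bool) (hgp : g p = false) (hgq : g q = false) :
    (cancelOrPush acc q p).filter g = acc.filter g := by
  unfold cancelOrPush
  by_cases hm : q ∈ acc
  · rw [if_pos hm, PySem.List.remove?_eq_some_erase acc q hm, Option.getD_some, List.erase_filter.symm]
    exact List.erase_of_not_mem (by simp [List.mem_filter, hgq])
  · rw [if_neg hm, List.filter_append]
    simp [hgp]

-- loop invariant: the two filtered views of the stack are the canonical blocks of the running tallies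
theorem pv_inv : ∀ (s : List Char) (acc : List String) (a b : Int),
    acc.filter (fun c => c == "N" || c == "S") = pvBlk a "N" "S" →
    acc.filter (fun c => c == "E" || c == "W") = pvBlk b "E" "W" →
    ((s.foldl (fun acc c =>
      if c = 'N' then cancelOrPush acc "S" "N"
      else if c = 'S' then cancelOrPush acc "N" "S"
      else if c = 'E' then cancelOrPush acc "W" "E"
      else if c = 'W' then cancelOrPush acc "E" "W"
      else acc) acc).filter (fun c => c == "N" || c == "S")
        = pvBlk (a + s.count 'N' - s.count 'S') "N" "S") ∧
    ((s.foldl (fun acc c =>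
      if c = 'N' then cancelOrPush acc "S" "N"
      else if c = 'S' then cancelOrPush acc "N" "S"
      else if c = 'E' then cancelOrPush acc "W" "E"
      else if c = 'W' then cancelOrPush acc "E" "W"
      else acc) acc).filter (fun c => c == "E" || c == "W")
        = pvBlk (b + s.count 'E' - s.count 'W') "E" "W") := by
  intro s
  induction s with
  | nil => intro acc a b h1 h2; simpa using ⟨h1, h2⟩
  | cons c t ih =>
    intro acc a b h1 h2
    simp only [List.foldl_cons, List.count_cons]
    by_cases hN : c = 'N'
    · subst hN
      simp only [reduceIte]
      have := ih (cancelOrPush acc "S" "N") (a + 1) b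
        (pv_step_main acc a "N" "S" (by decide) (fun c => c == "N" || c == "S")
          (by decide) (by decide) h1)
        ((pv_step_other acc "N" "S" (fun c => c == "E" || c == "W") (by decide) (by decide)).trans h2)
      refine ⟨this.1.trans ?_, this.2.trans ?_⟩ <;> · congr 1; try simp; try ring
    · by_cases hS : c = 'S'
      · subst hS
        simp only [reduceIte]
        have h1' : (cancelOrPush acc "N" "S").filter (fun c => c == "N" || c == "S")
            = pvBlk ((-a) + 1) "S" "N" :=
          pv_step_main acc (-a) "S" "N" (by decide) (fun c => c == "N" || c == "S")
            (by decide) (by decide) (by rw [h1, pvBlk_neg])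
        have h1'' : (cancelOrPush acc "N" "S").filter (fun c => c == "N" || c == "S")
            = pvBlk (a - 1) "N" "S" := by
          rw [h1', pvBlk_neg]; congr 1; ring
        have := ih (cancelOrPush acc "N" "S") (a - 1) b h1''
          ((pv_step_other acc "S" "N" (fun c => c == "E" || c == "W") (by decide) (by decide)).trans h2)
        refine ⟨this.1.trans ?_, this.2.trans ?_⟩ <;> · congr 1; try simp; try ring
      · by_cases hE : c = 'E'
        · subst hE
          simp only [reduceIte]
          have := ih (cancelOrPush acc "W" "E") a (b + 1)
            ((pv_step_other acc "E" "W" (fun c => c == "N" || c == "S") (by decide) (by decide)).trans h1)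
            (pv_step_main acc b "E" "W" (by decide) (fun c => c == "E" || c == "W")
              (by decide) (by decide) h2)
          refine ⟨this.1.trans ?_, this.2.trans ?_⟩ <;> · congr 1; try simp; try ring
        · by_cases hW : c = 'W'
          · subst hW
            simp only [reduceIte]
            have h2' : (cancelOrPush acc "E" "W").filter (fun c => c == "E" || c == "W")
                = pvBlk (b - 1) "E" "W" := by
              rw [pv_step_main acc (-b) "W" "E" (by decide) (fun c => c == "E" || c == "W")
                (by decide) (by decide) (by rw [h2, pvBlk_neg]), pvBlk_neg]
              congr 1; ring
            have := ih (cancelOrPush acc "E" "W") a (b - 1)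
              ((pv_step_other acc "W" "E" (fun c => c == "N" || c == "S") (by decide) (by decide)).trans h1) h2'
            refine ⟨this.1.trans ?_, this.2.trans ?_⟩ <;> · congr 1; try simp; try ring
          · simp only [if_neg hN, if_neg hS, if_neg hE, if_neg hW]
            have := ih acc a b h1 h2
            refine ⟨this.1.trans ?_, this.2.trans ?_⟩ <;>
              · congr 1
                simp [hN, hS, hE, hW]

theorem pv_dist {α : Type} (x a b : List α) (c c' : Prop) [Decidable c] [Decidable c'] :
    (if c then x ++ a else if c' then x ++ b else x)
    = x ++ (if c then a else if c' then b else []) := by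
  split_ifs <;> simp

-- A's post-norm_num block shape (Nat comparisons/replicates) is the canonical block
theorem pv_blockNat (m k : Nat) (p q : String) :
    (if k < m then List.replicate (m - k) p
     else if m < k then List.replicate |(↑m - ↑k : Int)|.toNat q else []) = pvBlk (↑m - ↑k) p q := by
  unfold pvBlk
  rcases Nat.lt_trichotomy k m with h | h | h
  · rw [if_pos h, if_pos (by omega : (0:Int) ≤ ↑m - ↑k)]
    congr 1
    omega
  · subst h; simp
  · rw [if_neg (by omega), if_pos h, if_neg (by omega)]
    congr 1
    rw [abs_of_neg (by omega : (↑m - ↑k : Int) < 0)]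

-- ===== VERDICT (by name: the statement is the Claim_ definition above) =====
theorem directions_spec : Claim_equal_directions := by
  intro goal _
  unfold Spec_directions directions directions_alt
  have hinv := pv_inv goal.toList [] 0 0 (by decide) (by decide)
  simp only [zero_add] at hinv
  simp only [PySem.Str.count_eq,
    show ("N" : String).toList = ['N'] from rfl, show ("S" : String).toList = ['S'] from rfl,
    show ("E" : String).toList = ['E'] from rfl, show ("W" : String).toList = ['W'] from rfl,
    pv_count_single]
  simp only [PySem.List.pyGet?, PySem.List.pyIdx?, List.length_cons, List.length_nil]
  norm_num
  try simp only [zero_add, List.nil_append]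
  rw [pv_dist, hinv.1, hinv.2, pv_blockNat, pv_blockNat]
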